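-- pv_equiv track=rewrite | github.com/aaronjzap/Almost-equienergetics_graphs | Crossover.py | Half_uniform
-- ===== SOURCE A (Python) =====
-- import copy
--
-- def Half_uniform(X,Y,tam):
--     diferentes=[ i for i in range(0,tam) if not(X[i]==Y[i])]
--     H1, H2= copy.deepcopy(X), copy.deepcopy(Y)
--     d=len(diferentes)
--     if d>=2:
--         t=int(d/2)
--         for d in diferentes[:t]:
--             H1[d]=H2[d]
--         for d in diferentes[t:]:
--             H2[d]=H1[d]
--     return [H1,H2]
-- ===== SOURCE B (Python) =====
-- import copy
--
-- def Half_uniform(X, Y, tam):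
--     # Single-point-crossover view: with t = d//2 and c = the t-th differing
--     # position, A's two half-loops amount to cutting both parents at c:
--     # every position before c ends up with Y's value (differing ones are
--     # assigned, equal ones already coincide) and every position from c on
--     # (up to tam) with X's value.  So build the children by slicing at c.
--     diffs = [i for i in range(tam) if X[i] != Y[i]]
--     d = len(diffs)
--     if d < 2:
--         return [copy.deepcopy(X), copy.deepcopy(Y)]
--     c = diffs[d // 2]
--     H1 = copy.deepcopy(Y[:c] + X[c:])
--     H2 = copy.deepcopy(Y[:c] + X[c:tam] + Y[tam:])
--     return [H1, H2]
-- ===== Notes on version B (the rewrite author's own statement) =====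
-- stated objective: alternative
-- what changed: B recognises that A's two half-loops implement a single-point crossover at c = the (d//2)-th differing index (positions before c all carry Y's value, positions from c up to tam carry X's), so it builds both children directly by slice concatenation Y[:c]+X[c:] and Y[:c]+X[c:tam]+Y[tam:] instead of mutating copies in place over the index list.
import Mathlib
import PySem

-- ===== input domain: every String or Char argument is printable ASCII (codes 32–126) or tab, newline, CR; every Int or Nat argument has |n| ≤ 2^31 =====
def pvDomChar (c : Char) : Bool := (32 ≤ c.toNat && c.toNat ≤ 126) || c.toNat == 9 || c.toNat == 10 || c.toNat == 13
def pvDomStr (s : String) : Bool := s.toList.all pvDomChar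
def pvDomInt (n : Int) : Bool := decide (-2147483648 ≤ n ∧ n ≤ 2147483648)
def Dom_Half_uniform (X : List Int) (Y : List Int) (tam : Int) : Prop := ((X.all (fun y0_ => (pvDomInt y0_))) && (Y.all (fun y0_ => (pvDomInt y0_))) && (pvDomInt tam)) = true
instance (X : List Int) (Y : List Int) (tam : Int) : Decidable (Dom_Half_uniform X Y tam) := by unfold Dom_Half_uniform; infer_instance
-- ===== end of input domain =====

-- B builds both children by slice concatenation at the single crossover point
-- c = diffs[d//2] instead of mutating copies in place over an index list
-- (objective: alternative algorithm; return value only — A mutates nothing).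

-- shared low-level helpers: xs[i] read (in range under Pre_), xs[i] = v assignment, X[i] != Y[i]
def pvGetZ (xs : List Int) (i : Int) : Int := (PySem.List.pyGet? xs i).getD 0
def pvSetZ (xs : List Int) (i : Int) (v : Int) : List Int := xs.set i.toNat v
def pvDiff (X Y : List Int) (i : Int) : Bool := !(pvGetZ X i == pvGetZ Y i)

-- ===== PORT A =====
def Half_uniform (X : List Int) (Y : List Int) (tam : Int) : List (List Int) :=
  let diferentes := (PySem.List.pyRange 0 tam 1).filter (fun i => pvDiff X Y i)
  let H1 := X
  let H2 := Y
  let d : Int := diferentes.length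
  if 2 ≤ d then
    -- int(d/2) on a nonnegative int equals floor division d // 2
    let t := PySem.Int.floordiv d 2
    let H1' := (PySem.List.slice diferentes none (some t)).foldl
                 (fun h i => pvSetZ h i (pvGetZ H2 i)) H1
    let H2' := (PySem.List.slice diferentes (some t) none).foldl
                 (fun h i => pvSetZ h i (pvGetZ H1' i)) H2
    [H1', H2']
  else [H1, H2]

-- ===== PORT B =====
def Half_uniform_alt (X : List Int) (Y : List Int) (tam : Int) : List (List Int) :=
  let diffs := (PySem.List.pyRange 0 tam 1).filter (fun i => pvDiff X Y i)
  let d : Int := diffs.length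
  if d < 2 then [X, Y]
  else
    let c := pvGetZ diffs (PySem.Int.floordiv d 2)
    let H1 := PySem.List.slice Y none (some c) ++ PySem.List.slice X (some c) none
    let H2 := PySem.List.slice Y none (some c) ++ PySem.List.slice X (some c) (some tam)
                ++ PySem.List.slice Y (some tam) none
    [H1, H2]

-- ===== PRECONDITION & SPEC =====
-- Pre_: Python A raises IndexError when tam exceeds a list length (it reads X[i], Y[i] for every i < tam).
def Pre_Half_uniform (X : List Int) (Y : List Int) (tam : Int) : Prop :=
  tam ≤ (X.length : Int) ∧ tam ≤ (Y.length : Int)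
instance (X : List Int) (Y : List Int) (tam : Int) : Decidable (Pre_Half_uniform X Y tam) := by
  unfold Pre_Half_uniform; infer_instance

def pvWitness_Half_uniform : List Int × List Int × Int := ([1, 2, 3], [3, 2, 1], 3)

def Spec_Half_uniform (X : List Int) (Y : List Int) (tam : Int) (out : List (List Int)) : Prop := out = Half_uniform_alt X Y tam
instance (X : List Int) (Y : List Int) (tam : Int) (out : List (List Int)) : Decidable (Spec_Half_uniform X Y tam out) := by unfold Spec_Half_uniform; infer_instance

-- ===== CLAIM (what is proved, stated in full; the proofs are below) =====
def Claim_equal_Half_uniform : Prop := ∀ (X : List Int) (Y : List Int) (tam : Int), Dom_Half_uniform X Y tam → Pre_Half_uniform X Y tam → Spec_Half_uniform X Y tam (Half_uniform X Y tam)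

-- ===== LEMMAS AND PROOFS =====

-- elementwise description of a fold of assignments at nonnegative indices
theorem pvFoldl_set_getElem? (v : Int → Int) (S : List Int) (hS : ∀ j ∈ S, 0 ≤ j)
    (A0 : List Int) (k : Nat) :
    (S.foldl (fun h j => pvSetZ h j (v j)) A0)[k]? =
      if ((k : Int) ∈ S) then A0[k]?.map (fun _ => v (k : Int)) else A0[k]? := by
  induction S generalizing A0 with
  | nil => simp
  | cons j S ih =>
    have hj0 : 0 ≤ j := hS j (by simp)
    rw [List.foldl_cons, ih (fun x hx => hS x (by simp [hx]))]
    have hset : ∀ m : Nat, (pvSetZ A0 j (v j))[m]? =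
        if j.toNat = m then (if m < A0.length then some (v j) else none) else A0[m]? := by
      intro m
      simp only [pvSetZ, List.getElem?_set]
      by_cases h : j.toNat = m <;> simp [h]
    by_cases hjk : j = (k : Int)
    · have hjt : j.toNat = k := by omega
      have hsetk : (pvSetZ A0 j (v j))[k]? =
          if k < A0.length then some (v (k : Int)) else none := by
        rw [hset k]; simp [hjk]
      have hrhs : (if (k : Int) ∈ j :: S then Option.map (fun _ => v (k : Int)) A0[k]?
          else A0[k]?) = Option.map (fun _ => v (k : Int)) A0[k]? := by
        simp [List.mem_cons, hjk]
      rw [hrhs]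
      have hmap : Option.map (fun _ => v (k : Int)) A0[k]? =
          if k < A0.length then some (v (k : Int)) else none := by
        rcases Nat.lt_or_ge k A0.length with hk | hk
        · rw [List.getElem?_eq_getElem hk, if_pos hk]; rfl
        · rw [List.getElem?_eq_none (by omega), if_neg (by omega)]; rfl
      rw [hmap]
      by_cases hmem : (k : Int) ∈ S
      · rw [if_pos hmem, hsetk]
        rcases Nat.lt_or_ge k A0.length with hk | hk <;> simp [hk, Nat.not_lt.2]
      · rw [if_neg hmem, hsetk]
    · have hjt : j.toNat ≠ k := by omega
      have hkj : ¬ ((k : Int) = j) := fun h => hjk h.symm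
      by_cases hmem : (k : Int) ∈ S <;> simp [hmem, hset, hjt, List.mem_cons, hkj]

-- membership in take/drop of a strictly sorted list, split at position tn
theorem pvMem_take_iff (S : List Int) (hP : S.Pairwise (· < ·)) (tn : Nat)
    (htn : tn < S.length) (j : Int) :
    j ∈ S.take tn ↔ j ∈ S ∧ j < S[tn] := by
  rw [List.pairwise_iff_getElem] at hP
  constructor
  · intro h
    obtain ⟨i, hi, rfl⟩ := List.mem_iff_getElem.1 h
    rw [List.length_take] at hi
    rw [List.getElem_take]
    exact ⟨List.getElem_mem _, hP i tn (by omega) htn (by omega)⟩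
  · rintro ⟨hmem, hlt⟩
    obtain ⟨i, hi, rfl⟩ := List.mem_iff_getElem.1 hmem
    have hitn : i < tn := by
      by_contra hge
      rcases Nat.lt_or_ge tn i with h' | h'
      · exact absurd (hP tn i htn hi h') (by omega)
      · have : i = tn := by omega
        subst this; exact absurd hlt (by omega)
    exact List.mem_iff_getElem.2 ⟨i, by rw [List.length_take]; omega, by rw [List.getElem_take]⟩

theorem pvMem_drop_iff (S : List Int) (hP : S.Pairwise (· < ·)) (tn : Nat)
    (htn : tn < S.length) (j : Int) :
    j ∈ S.drop tn ↔ j ∈ S ∧ S[tn] ≤ j := by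
  rw [List.pairwise_iff_getElem] at hP
  constructor
  · intro h
    obtain ⟨m, hm, rfl⟩ := List.mem_iff_getElem.1 h
    rw [List.length_drop] at hm
    rw [List.getElem_drop]
    refine ⟨List.getElem_mem _, ?_⟩
    rcases Nat.eq_zero_or_pos m with rfl | hm0
    · simp
    · exact le_of_lt (hP tn (tn + m) htn _ (by omega))
  · rintro ⟨hmem, hle⟩
    obtain ⟨i, hi, rfl⟩ := List.mem_iff_getElem.1 hmem
    have hitn : tn ≤ i := by
      by_contra hlt
      exact absurd (hP i tn hi htn (by omega)) (by omega)
    refine List.mem_iff_getElem.2 ⟨i - tn, by rw [List.length_drop]; omega, ?_⟩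
    rw [List.getElem_drop]
    congr 1; omega

-- strict sortedness of the differing-index list
theorem pvPairwise_diffs (X Y : List Int) (tam : Int) (h0 : 0 ≤ tam) :
    (((PySem.List.pyRange 0 tam 1).filter (fun i => pvDiff X Y i)).Pairwise (· < ·)) := by
  apply List.Pairwise.filter
  have h : tam = ((tam.toNat : Nat) : Int) := by omega
  rw [h, PySem.List.pyRange_zero_natCast]
  exact List.Pairwise.map _ (fun a b hab => by exact_mod_cast hab) List.pairwise_lt_range

-- in-range reads reduce to getElem
theorem pvGetZ_eq (xs : List Int) (k : Nat) (hk : k < xs.length) :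
    pvGetZ xs (k : Int) = xs[k] := by
  simp [pvGetZ, PySem.List.pyGet?_natCast, List.getElem?_eq_getElem hk]

theorem Half_uniform_spec : Claim_equal_Half_uniform := by
  intro X Y tam _ hpre
  obtain ⟨hX, hY⟩ := hpre
  unfold Spec_Half_uniform
  simp only [Half_uniform, Half_uniform_alt]
  set D := (PySem.List.pyRange 0 tam 1).filter (fun i => pvDiff X Y i) with hD
  set d : Int := (D.length : Int) with hd
  by_cases hd2 : 2 ≤ d
  · rw [if_pos hd2, if_neg (by omega)]
    -- basic facts
    have hmemD : ∀ j ∈ D, 0 ≤ j ∧ j < tam ∧ pvDiff X Y j := by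
      intro j hj
      have h1 := List.mem_of_mem_filter hj
      have h2 := List.of_mem_filter hj
      exact ⟨(PySem.List.mem_pyRange_one.1 h1).1, (PySem.List.mem_pyRange_one.1 h1).2, h2⟩
    have hDpos : ∀ j ∈ D, 0 ≤ j := fun j hj => (hmemD j hj).1
    have htam0 : 0 < tam := by
      have hne : D ≠ [] := by intro h; rw [h] at hd; simp [hd] at hd2
      obtain ⟨j, hj⟩ := List.exists_mem_of_ne_nil D hne
      have := hmemD j hj; omega
    have hP : D.Pairwise (· < ·) := pvPairwise_diffs X Y tam (by omega)
    -- t and tn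
    set t := PySem.Int.floordiv d 2 with ht
    have htediv : t = d / 2 := PySem.Int.floordiv_eq_ediv_of_pos (by omega)
    have ht0 : 0 ≤ t := by omega
    have htd : t < d := by omega
    have htnlen : t.toNat < D.length := by omega
    -- the crossover point c
    set c := D[t.toNat]'htnlen with hc
    have hcD : c ∈ D := List.getElem_mem _
    have hc0 : 0 ≤ c := (hmemD c hcD).1
    have hctam : c < tam := (hmemD c hcD).2.1
    have hcX : c.toNat ≤ X.length := by omega
    have hcY : c.toNat ≤ Y.length := by omega
    have hread : pvGetZ D t = c := by
      rw [pvGetZ, PySem.List.pyGet?_of_nonneg _ ht0, List.getElem?_eq_getElem htnlen]; rfl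
    rw [hread]
    -- slices become take/drop
    rw [PySem.List.slice_to _ ht0, PySem.List.slice_from _ ht0,
        PySem.List.slice_to _ hc0,
        PySem.List.slice_toNat _ hc0 (by omega : (0:Int) ≤ tam),
        PySem.List.slice_from _ (by omega : (0:Int) ≤ tam),
        PySem.List.slice_from _ hc0]
    -- membership characterisations
    have hmemtake : ∀ j : Int, j ∈ D.take t.toNat ↔ j ∈ D ∧ j < c :=
      pvMem_take_iff D hP t.toNat htnlen
    have hmemdrop : ∀ j : Int, j ∈ D.drop t.toNat ↔ j ∈ D ∧ c ≤ j :=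
      pvMem_drop_iff D hP t.toNat htnlen
    have hmemD_iff : ∀ k : Nat, ((k : Int) ∈ D) ↔ ((k : Int) < tam ∧ pvDiff X Y (k : Int)) := by
      intro k
      constructor
      · intro h; exact ⟨(hmemD _ h).2.1, (hmemD _ h).2.2⟩
      · rintro ⟨h1, h2⟩
        exact List.mem_filter.2 ⟨PySem.List.mem_pyRange_one.2 ⟨by omega, h1⟩, h2⟩
    have hDiff_eq : ∀ k : Nat, (k : Int) < tam → pvDiff X Y (k : Int) = false → X[k]? = Y[k]? := by
      intro k hk hdf
      have hkX : k < X.length := by omega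
      have hkY : k < Y.length := by omega
      simp [pvDiff, pvGetZ_eq X k hkX, pvGetZ_eq Y k hkY] at hdf
      rw [List.getElem?_eq_getElem hkX, List.getElem?_eq_getElem hkY, hdf]
    -- elementwise values of B's two concatenations
    have hrhs1 : ∀ k : Nat, (Y.take c.toNat ++ X.drop c.toNat)[k]? =
        if k < c.toNat then Y[k]? else X[k]? := by
      intro k
      by_cases hkc : k < c.toNat
      · rw [if_pos hkc, List.getElem?_append_left (by rw [List.length_take]; omega),
            List.getElem?_take_of_lt hkc]
      · rw [if_neg hkc, List.getElem?_append_right (by rw [List.length_take]; omega),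
            List.getElem?_drop, List.length_take]
        congr 1; omega
    have hrhs2 : ∀ k : Nat,
        (Y.take c.toNat ++ List.take (tam.toNat - c.toNat) (X.drop c.toNat) ++ Y.drop tam.toNat)[k]? =
        if k < c.toNat then Y[k]? else if k < tam.toNat then X[k]? else Y[k]? := by
      intro k
      have hlenA : (Y.take c.toNat).length = c.toNat := by rw [List.length_take]; omega
      have hlenB : (List.take (tam.toNat - c.toNat) (X.drop c.toNat)).length = tam.toNat - c.toNat := by
        rw [List.length_take, List.length_drop]; omega
      have hlenAB : (Y.take c.toNat ++ List.take (tam.toNat - c.toNat) (X.drop c.toNat)).length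
          = tam.toNat := by rw [List.length_append, hlenA, hlenB]; omega
      by_cases hkc : k < c.toNat
      · rw [if_pos hkc,
            List.getElem?_append_left (by rw [List.length_append, hlenA, hlenB]; omega),
            List.getElem?_append_left (by omega : k < (Y.take c.toNat).length),
            List.getElem?_take_of_lt hkc]
      · by_cases hkt : k < tam.toNat
        · rw [if_neg hkc, if_pos hkt,
              List.getElem?_append_left (by omega : k < (Y.take c.toNat ++ List.take (tam.toNat - c.toNat) (X.drop c.toNat)).length),
              List.getElem?_append_right (by omega : (Y.take c.toNat).length ≤ k),
              List.getElem?_take_of_lt (by rw [hlenA]; omega),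
              List.getElem?_drop, hlenA]
          congr 1; omega
        · rw [if_neg hkc, if_neg hkt,
              List.getElem?_append_right (by omega : (Y.take c.toNat ++ List.take (tam.toNat - c.toNat) (X.drop c.toNat)).length ≤ k),
              List.getElem?_drop, hlenAB]
          congr 1; omega
    -- first child: the first half-loop is the cut at c
    have hH1 : (D.take t.toNat).foldl (fun h i => pvSetZ h i (pvGetZ Y i)) X =
        Y.take c.toNat ++ X.drop c.toNat := by
      apply List.ext_getElem?
      intro k
      rw [pvFoldl_set_getElem? _ _ (fun j hj => hDpos j (List.mem_of_mem_take hj)) X k, hrhs1 k]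
      by_cases hkc : k < c.toNat
      · have hktam : (k : Int) < tam := by omega
        have hkX : k < X.length := by omega
        have hkY : k < Y.length := by omega
        by_cases hdf : pvDiff X Y (k : Int)
        · rw [if_pos ((hmemtake _).2 ⟨(hmemD_iff k).2 ⟨hktam, hdf⟩, by omega⟩), if_pos hkc,
              List.getElem?_eq_getElem hkX, List.getElem?_eq_getElem hkY]
          simp [pvGetZ_eq Y k hkY]
        · rw [if_neg (fun h => hdf ((hmemD _ ((hmemtake _).1 h).1).2.2)), if_pos hkc]
          exact hDiff_eq k hktam (by simpa using hdf)
      · rw [if_neg (fun h => hkc (by have := ((hmemtake _).1 h).2; omega)), if_neg hkc]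
    rw [hH1]
    -- on the second half the updated H1 reads back X's values
    have hcongr : (D.drop t.toNat).foldl
        (fun h i => pvSetZ h i (pvGetZ (Y.take c.toNat ++ X.drop c.toNat) i)) Y =
        (D.drop t.toNat).foldl (fun h i => pvSetZ h i (pvGetZ X i)) Y := by
      apply PySem.List.foldl_congr_mem
      intro acc j hj
      have hjc : c ≤ j := ((hmemdrop _).1 hj).2
      have hj0 : 0 ≤ j := hDpos j (List.mem_of_mem_drop hj)
      have : pvGetZ (Y.take c.toNat ++ X.drop c.toNat) j = pvGetZ X j := by
        have hcast : j = ((j.toNat : Nat) : Int) := by omega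
        rw [hcast, pvGetZ, pvGetZ, PySem.List.pyGet?_natCast, PySem.List.pyGet?_natCast,
            hrhs1 j.toNat, if_neg (by omega)]
      rw [this]
    rw [hcongr]
    -- second child: the second half-loop is the cut back at c (up to tam)
    have hH2 : (D.drop t.toNat).foldl (fun h i => pvSetZ h i (pvGetZ X i)) Y =
        Y.take c.toNat ++ List.take (tam.toNat - c.toNat) (X.drop c.toNat) ++ Y.drop tam.toNat := by
      apply List.ext_getElem?
      intro k
      rw [pvFoldl_set_getElem? _ _ (fun j hj => hDpos j (List.mem_of_mem_drop hj)) Y k, hrhs2 k]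
      by_cases hkc : k < c.toNat
      · rw [if_neg (fun h => by have := ((hmemdrop _).1 h).2; omega), if_pos hkc]
      · by_cases hkt : k < tam.toNat
        · have hktam : (k : Int) < tam := by omega
          have hkX : k < X.length := by omega
          have hkY : k < Y.length := by omega
          by_cases hdf : pvDiff X Y (k : Int)
          · rw [if_pos ((hmemdrop _).2 ⟨(hmemD_iff k).2 ⟨hktam, hdf⟩, by omega⟩),
                if_neg hkc, if_pos hkt,
                List.getElem?_eq_getElem hkX, List.getElem?_eq_getElem hkY]
            simp [pvGetZ_eq X k hkX]
          · rw [if_neg (fun h => hdf ((hmemD _ ((hmemdrop _).1 h).1).2.2)), if_neg hkc, if_pos hkt]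
            exact (hDiff_eq k hktam (by simpa using hdf)).symm
        · rw [if_neg (fun h => by
              have := (hmemD_iff k).1 ((hmemdrop _).1 h).1; omega),
              if_neg hkc, if_neg hkt]
    rw [hH2]
  · rw [if_neg hd2, if_pos (by omega)]
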